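-- pv_equiv track=rewrite | github.com/AdeX11/concept_critic_models | envs/momentum_corridor_core.py | _advance_mover
-- ===== SOURCE A (Python) =====
-- from typing import Dict, Optional, Tuple
--
-- MOVER_RAIL_X = tuple(range(1, 8))
--
-- def _advance_mover(mover_x: int, mover_velocity: int) -> Tuple[int, int]:
--     next_x = mover_x + mover_velocity
--     next_velocity = mover_velocity
--     while next_x < MOVER_RAIL_X[0] or next_x > MOVER_RAIL_X[-1]:
--         if next_x < MOVER_RAIL_X[0]:
--             next_x = 2 * MOVER_RAIL_X[0] - next_x
--             next_velocity = -next_velocity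
--         elif next_x > MOVER_RAIL_X[-1]:
--             next_x = 2 * MOVER_RAIL_X[-1] - next_x
--             next_velocity = -next_velocity
--     return next_x, next_velocity
-- ===== SOURCE B (Python) =====
-- MOVER_RAIL_X = tuple(range(1, 8))
--
-- def _advance_mover(mover_x: int, mover_velocity: int):
--     p = mover_x + mover_velocity
--     if 1 <= p <= 7:
--         return p, mover_velocity
--     m = (p - 1) % 12
--     pos = 1 + m if m < 6 else 13 - m
--     if 1 <= m <= 5:
--         flip = False
--     elif m == 0:
--         flip = p > 7
--     elif m == 6:
--         flip = p < 1
--     else: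
--         flip = True
--     return pos, -mover_velocity if flip else mover_velocity
-- ===== Notes on version B (the rewrite author's own statement) =====
-- stated objective: faster
-- what changed: Replaces the reflect-until-in-range while loop with a closed-form triangle-wave fold via (p-1) % 12 plus a parity case split for the velocity sign, making the function O(1) instead of O(|velocity|).
import Mathlib
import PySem

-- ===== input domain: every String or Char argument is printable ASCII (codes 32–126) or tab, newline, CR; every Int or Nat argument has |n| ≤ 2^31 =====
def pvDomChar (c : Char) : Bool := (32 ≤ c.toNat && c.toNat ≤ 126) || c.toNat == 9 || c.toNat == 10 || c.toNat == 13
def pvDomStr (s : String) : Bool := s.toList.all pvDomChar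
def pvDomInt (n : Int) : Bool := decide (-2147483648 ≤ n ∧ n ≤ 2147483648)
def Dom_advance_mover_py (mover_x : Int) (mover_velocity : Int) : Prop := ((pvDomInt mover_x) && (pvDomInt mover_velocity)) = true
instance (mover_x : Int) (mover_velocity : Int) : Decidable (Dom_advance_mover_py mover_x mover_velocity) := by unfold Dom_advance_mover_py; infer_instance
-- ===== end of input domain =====

-- B replaces A's reflect-until-in-range loop by a closed-form (p-1) % 12 triangle-wave
-- fold with a case split for the velocity sign (objective: faster, O(1) vs O(|velocity|)).

-- ===== PORT A =====
-- A's while loop: reflect next_x off the rail ends (1 and 7), negating the velocity each time.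
def advRecA (next_x : Int) (next_velocity : Int) : List Int :=
  if next_x < 1 then advRecA (2 * 1 - next_x) (-next_velocity)
  else if next_x > 7 then advRecA (2 * 7 - next_x) (-next_velocity)
  else [next_x, next_velocity]
termination_by (max (1 - next_x) (max (next_x - 7) 0)).toNat
decreasing_by all_goals omega

def advance_mover_py (mover_x : Int) (mover_velocity : Int) : List Int :=
  advRecA (mover_x + mover_velocity) mover_velocity

-- ===== PORT B =====
def advance_mover_py_alt (mover_x : Int) (mover_velocity : Int) : List Int :=
  let p := mover_x + mover_velocity
  if 1 ≤ p ∧ p ≤ 7 then [p, mover_velocity]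
  else
    let m := PySem.Int.mod (p - 1) 12
    let pos := if m < 6 then 1 + m else 13 - m
    let flip := if 1 ≤ m ∧ m ≤ 5 then False
                else if m = 0 then p > 7
                else if m = 6 then p < 1
                else True
    [pos, if flip then -mover_velocity else mover_velocity]

-- ===== PRECONDITION & SPEC =====
def Spec_advance_mover_py (mover_x : Int) (mover_velocity : Int) (out : List Int) : Prop := out = advance_mover_py_alt mover_x mover_velocity
instance (mover_x : Int) (mover_velocity : Int) (out : List Int) : Decidable (Spec_advance_mover_py mover_x mover_velocity out) := by unfold Spec_advance_mover_py; infer_instance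

-- ===== CLAIM (what is proved, stated in full; the proofs are below) =====
def Claim_equal_advance_mover_py : Prop := ∀ (mover_x : Int) (mover_velocity : Int), Dom_advance_mover_py mover_x mover_velocity → Spec_advance_mover_py mover_x mover_velocity (advance_mover_py mover_x mover_velocity)

-- ===== LEMMAS AND PROOFS =====

-- B's closed form with the landing position p = mover_x + mover_velocity as a free variable.
def cf (p : Int) (v : Int) : List Int :=
  if 1 ≤ p ∧ p ≤ 7 then [p, v]
  else
    let m := PySem.Int.mod (p - 1) 12
    let pos := if m < 6 then 1 + m else 13 - m
    let flip := if 1 ≤ m ∧ m ≤ 5 then False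
                else if m = 0 then p > 7
                else if m = 6 then p < 1
                else True
    [pos, if flip then -v else v]

lemma cf_alt (x v : Int) : advance_mover_py_alt x v = cf (x + v) v := rfl

lemma pymod12 (a : Int) : PySem.Int.mod a 12 = a % 12 :=
  PySem.Int.mod_eq_emod_of_pos (by norm_num)

lemma cf_reflect_low (p v : Int) (h : p < 1) : cf (2 - p) (-v) = cf p v := by
  simp only [cf, pymod12]
  split_ifs <;>
    first
      | exact (‹False›).elim
      | (simp only [List.cons.injEq, and_true, neg_neg]; omega)

lemma cf_reflect_high (p v : Int) (h : 7 < p) : cf (14 - p) (-v) = cf p v := by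
  simp only [cf, pymod12]
  split_ifs <;>
    first
      | exact (‹False›).elim
      | (simp only [List.cons.injEq, and_true, neg_neg]; omega)

lemma advRecA_eq_cf (p v : Int) : advRecA p v = cf p v := by
  induction p, v using advRecA.induct with
  | case1 x v h ih =>
      rw [advRecA, if_pos h, ih]
      have := cf_reflect_low x v h
      simpa using this
  | case2 x v h1 h2 ih =>
      rw [advRecA, if_neg h1, if_pos h2, ih]
      have := cf_reflect_high x v h2
      simpa using this
  | case3 x v h1 h2 =>
      rw [advRecA, if_neg h1, if_neg h2]
      rw [cf, if_pos (by omega)]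

theorem advance_mover_py_spec : Claim_equal_advance_mover_py := by
  intro x v _
  show advance_mover_py x v = advance_mover_py_alt x v
  rw [advance_mover_py, advRecA_eq_cf, cf_alt]
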